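-- pv_equiv track=rewrite | github.com/pranavjindal29/Competitive-Coding-Archives-Leetcode | 1860-find-kth-largest-xor-coordinate-value/find-kth-largest-xor-coordinate-value.py | construct_xors
-- ===== SOURCE A (Python) =====
-- def construct_xors(xors):
--     m = len(xors)
--     n = len(xors[0])
--
--     def valid_coord(i, j):
--         return 0 <= i < m and 0 <= j < n
--
--     for i in range(m):
--         for j in range(n):
--             for di, dj in ((-1, 0), (0, -1), (-1, -1)):
--                 ci, cj = i + di, j + dj
--                 xors[i][j] ^= xors[ci][cj] * valid_coord(ci, cj)
--
--     xors = [xor for row in xors for xor in row]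
--     return xors
-- ===== SOURCE B (Python) =====
-- def construct_xors(xors):
--     m = len(xors)
--     n = len(xors[0])
--
--     for row in xors:
--         for j in range(1, n):
--             row[j] ^= row[j - 1]
--
--     for i in range(1, m):
--         for j in range(n):
--             xors[i][j] ^= xors[i - 1][j]
--
--     return [x for row in xors for x in row]
-- ===== Notes on version B (the rewrite author's own statement) =====
-- stated objective: faster
-- what changed: Replaces the per-cell three-neighbor recurrence with validity-masked wraparound reads by two separable in-place cumulative-XOR passes: first each row left-to-right, then each column top-to-bottom.
import Mathlib
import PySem

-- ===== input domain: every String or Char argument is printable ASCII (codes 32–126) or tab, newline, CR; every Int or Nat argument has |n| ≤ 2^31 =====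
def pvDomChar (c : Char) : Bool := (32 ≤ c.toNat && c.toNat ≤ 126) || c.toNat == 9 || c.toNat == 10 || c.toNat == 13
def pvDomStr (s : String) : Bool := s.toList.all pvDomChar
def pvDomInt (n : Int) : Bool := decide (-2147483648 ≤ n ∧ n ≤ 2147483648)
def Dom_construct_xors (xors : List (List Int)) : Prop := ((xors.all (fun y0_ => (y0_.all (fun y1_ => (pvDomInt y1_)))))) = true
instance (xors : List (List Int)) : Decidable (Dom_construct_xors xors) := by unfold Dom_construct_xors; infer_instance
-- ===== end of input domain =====

-- B replaces A's per-cell three-neighbor masked recurrence by two separable cumulative-XOR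
-- passes (rows left-to-right, then columns top-down); equal return value on Pre_ (the Python
-- A and B both also mutate the argument grid, identically where A returns).

-- ===== PORT A =====
-- xors[ci][cj]: Python indexing incl. negative wraparound; the `.getD` defaults are hit only
-- outside Pre_ (where Python A raises IndexError)
def pvAread (g : List (List Int)) (ci cj : Int) : Int :=
  (PySem.List.pyGet? ((PySem.List.pyGet? g ci).getD []) cj).getD 0

-- valid_coord(ci, cj)
def pvAvalid (m n ci cj : Int) : Bool := decide (0 ≤ ci ∧ ci < m ∧ 0 ≤ cj ∧ cj < n)

-- body of the two inner loops: for (di,dj) in ((-1,0),(0,-1),(-1,-1)): xors[i][j] ^= xors[ci][cj]*valid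
def pvAcell (m n : Int) (i j : Nat) (g : List (List Int)) : List (List Int) :=
  [((-1 : Int), (0 : Int)), (0, -1), (-1, -1)].foldl
    (fun g d =>
      let ci : Int := (i : Int) + d.1
      let cj : Int := (j : Int) + d.2
      let v : Int := pvAread g ci cj * (if pvAvalid m n ci cj then 1 else 0)
      g.modify i (fun row => row.modify j (fun x => PySem.Int.bxor x v))) g

def construct_xors (xors : List (List Int)) : List Int :=
  let m := xors.length
  let n := ((PySem.List.pyGet? xors 0).getD []).length
  ((List.range m).foldl
    (fun g i => (List.range n).foldl (fun g j => pvAcell (m : Int) (n : Int) i j g) g)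
    xors).flatten

-- ===== PORT B =====
-- for j in range(1, n): row[j] ^= row[j-1]
def pvRowPass (n : Nat) (row : List Int) : List Int :=
  (List.range' 1 (n - 1)).foldl
    (fun r j => r.modify j (fun x => PySem.Int.bxor x (r.getD (j - 1) 0))) row

-- for i in range(1, m): for j in range(n): xors[i][j] ^= xors[i-1][j]
def pvColPass (m n : Nat) (g : List (List Int)) : List (List Int) :=
  (List.range' 1 (m - 1)).foldl
    (fun g i =>
      (List.range n).foldl
        (fun g j => g.modify i (fun row => row.modify j
          (fun x => PySem.Int.bxor x ((g.getD (i - 1) []).getD j 0)))) g) g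

def construct_xors_alt (xors : List (List Int)) : List Int :=
  let m := xors.length
  let n := ((PySem.List.pyGet? xors 0).getD []).length
  (pvColPass m n (xors.map (pvRowPass n))).flatten

-- ===== PRECONDITION & SPEC =====
-- Exactly where the Python A returns: a non-empty grid whose every row is at least as long as
-- row 0 (on the empty grid, or when some row is shorter than row 0, A raises IndexError).
def Pre_construct_xors (xors : List (List Int)) : Prop :=
  xors ≠ [] ∧ ∀ row ∈ xors, (xors.headD []).length ≤ row.length
instance (xors : List (List Int)) : Decidable (Pre_construct_xors xors) := by
  unfold Pre_construct_xors; infer_instance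

def pvWitness_construct_xors : List (List Int) := [[5, 2], [1, 6]]

def Spec_construct_xors (xors : List (List Int)) (out : List Int) : Prop := out = construct_xors_alt xors
instance (xors : List (List Int)) (out : List Int) : Decidable (Spec_construct_xors xors out) := by
  unfold Spec_construct_xors; infer_instance

-- ===== CLAIM (what is proved, stated in full; the proofs are below) =====
def Claim_equal_construct_xors : Prop := ∀ (xors : List (List Int)), Dom_construct_xors xors → Pre_construct_xors xors → Spec_construct_xors xors (construct_xors xors)

-- ===== LEMMAS AND PROOFS =====

theorem pv_bxor_natCast_negSucc (m n : Nat) :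
    PySem.Int.bxor (m : Int) (-(n : Int) - 1) = -((m ^^^ n : Nat) : Int) - 1 := by
  unfold PySem.Int.bxor
  have h2 : (-(-(n:Int) - 1) - 1).toNat = n := by omega
  have h3 : ((m:Int)).toNat = m := by omega
  simp [h2, h3]
  omega
theorem pv_bxor_negSucc_natCast (m n : Nat) :
    PySem.Int.bxor (-(m : Int) - 1) (n : Int) = -((m ^^^ n : Nat) : Int) - 1 := by
  unfold PySem.Int.bxor
  have h2 : (-(-(m:Int) - 1) - 1).toNat = m := by omega
  have h3 : ((n:Int)).toNat = n := by omega
  simp [h2, h3]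
  omega
theorem pv_bxor_negSucc_negSucc (m n : Nat) :
    PySem.Int.bxor (-(m : Int) - 1) (-(n : Int) - 1) = ((m ^^^ n : Nat) : Int) := by
  unfold PySem.Int.bxor
  have h2 : (-(-(n:Int) - 1) - 1).toNat = n := by omega
  have h2' : (-(-(m:Int) - 1) - 1).toNat = m := by omega
  simp [h2, h2']
  omega
theorem pv_bxor_assoc (a b c : Int) :
    PySem.Int.bxor (PySem.Int.bxor a b) c = PySem.Int.bxor a (PySem.Int.bxor b c) := by
  obtain ⟨m, rfl | rfl⟩ : ∃ m : Nat, a = (m : Int) ∨ a = -(m:Int) - 1 := by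
    rcases a with m | m
    · exact ⟨m, Or.inl rfl⟩
    · exact ⟨m, Or.inr (by simp [Int.negSucc_eq]; ring)⟩
  all_goals (
    obtain ⟨k, rfl | rfl⟩ : ∃ k : Nat, b = (k : Int) ∨ b = -(k:Int) - 1 := by
      rcases b with k | k
      · exact ⟨k, Or.inl rfl⟩
      · exact ⟨k, Or.inr (by simp [Int.negSucc_eq]; ring)⟩)
  all_goals (
    obtain ⟨l, rfl | rfl⟩ : ∃ l : Nat, c = (l : Int) ∨ c = -(l:Int) - 1 := by
      rcases c with l | l
      · exact ⟨l, Or.inl rfl⟩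
      · exact ⟨l, Or.inr (by simp [Int.negSucc_eq]; ring)⟩)
  all_goals simp only [PySem.Int.bxor_natCast, pv_bxor_natCast_negSucc,
    pv_bxor_negSucc_natCast, pv_bxor_negSucc_negSucc, Nat.xor_assoc]

theorem pv_getD_modify {α : Type} (l : List α) (i j : Nat) (f : α → α) (d : α) :
    (l.modify i f).getD j d =
      if i = j ∧ j < l.length then f (l.getD j d) else l.getD j d := by
  simp only [List.getD_eq_getElem?_getD, List.getElem?_modify]
  by_cases h : j < l.length
  · rw [List.getElem?_eq_getElem h]
    by_cases hij : i = j <;> simp [hij, h]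
  · rw [List.getElem?_eq_none (by omega)]
    simp [h]
def pvXpre (a : List Int) (j : Nat) : Int := (a.take (j + 1)).foldl PySem.Int.bxor 0
theorem pv_zero_bxor (a : Int) : PySem.Int.bxor 0 a = a := by
  rw [PySem.Int.bxor_comm]; exact PySem.Int.bxor_zero a
theorem pvXpre_zero (a : List Int) (h : 0 < a.length) : pvXpre a 0 = a.getD 0 0 := by
  unfold pvXpre
  rw [List.take_add_one]
  simp [pv_zero_bxor, List.getD_eq_getElem?_getD, List.getElem?_eq_getElem h]
theorem pvXpre_succ (a : List Int) (j : Nat) (h : j + 1 < a.length) :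
    pvXpre a (j + 1) = PySem.Int.bxor (pvXpre a j) (a.getD (j + 1) 0) := by
  unfold pvXpre
  rw [List.take_add_one, List.foldl_append]
  rw [List.getElem?_eq_getElem h]
  simp [List.getD_eq_getElem?_getD, List.getElem?_eq_getElem h]


theorem pvRowPass_aux (a : List Int) (n : Nat) (hn : n ≤ a.length) :
    ∀ t, t ≤ n - 1 →
      ((List.range' 1 t).foldl
          (fun r j => r.modify j (fun x => PySem.Int.bxor x (r.getD (j - 1) 0))) a).length = a.length ∧
      ∀ j, ((List.range' 1 t).foldl
          (fun r j => r.modify j (fun x => PySem.Int.bxor x (r.getD (j - 1) 0))) a).getD j 0 =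
        if j < t + 1 ∧ j < a.length then pvXpre a j else a.getD j 0 := by
  intro t
  induction t with
  | zero =>
    intro _
    refine ⟨rfl, fun j => ?_⟩
    simp only [List.range'_zero, List.foldl_nil]
    by_cases hj : j < 0 + 1 ∧ j < a.length
    · obtain ⟨hj1, hj2⟩ := hj
      interval_cases j
      simp [pvXpre_zero a hj2, hj2]
    · simp only [if_neg hj]
  | succ t ih =>
    intro ht
    obtain ⟨ihl, ihg⟩ := ih (by omega)
    rw [List.range'_concat]
    simp only [Nat.one_mul]
    simp only [List.foldl_append, List.foldl_cons, List.foldl_nil]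
    set L := (List.range' 1 t).foldl
        (fun r j => r.modify j (fun x => PySem.Int.bxor x (r.getD (j - 1) 0))) a with hL
    constructor
    · rw [List.length_modify, ihl]
    · intro j
      rw [pv_getD_modify, ihl]
      have h1t : 1 + t < a.length := by omega
      by_cases hj : 1 + t = j ∧ j < a.length
      · obtain ⟨hj1, hj2⟩ := hj
        subst hj1
        rw [if_pos ⟨rfl, h1t⟩]
        rw [ihg (1 + t), ihg (1 + t - 1)]
        rw [if_neg (by omega), if_pos (by omega)]
        have : 1 + t = t + 1 := by omega
        rw [this, pvXpre_succ a t (by omega)]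
        rw [if_pos (by omega)]
        have : t + 1 - 1 = t := by omega
        rw [this, PySem.Int.bxor_comm]
      · rw [if_neg hj, ihg j]
        by_cases hja : j < a.length
        · by_cases hjt : j < t + 1
          · rw [if_pos ⟨hjt, hja⟩, if_pos ⟨by omega, hja⟩]
          · rw [if_neg (by omega), if_neg (by omega)]
        · rw [if_neg (by omega), if_neg (by omega)]

theorem pvRowPass_length (n : Nat) (a : List Int) : (pvRowPass n a).length = a.length := by
  unfold pvRowPass
  induction (List.range' 1 (n-1)) generalizing a with
  | nil => rfl
  | cons x xs ih => simp only [List.foldl_cons]; rw [ih]; simp [List.length_modify]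

theorem pvRowPass_getD (n : Nat) (a : List Int) (hn : n ≤ a.length) (j : Nat) :
    (pvRowPass n a).getD j 0 = if j < n then pvXpre a j else a.getD j 0 := by
  rcases Nat.eq_zero_or_pos n with h0 | hpos
  · subst h0; simp [pvRowPass]
  · obtain ⟨_, hg⟩ := pvRowPass_aux a n hn (n - 1) (le_refl _)
    unfold pvRowPass
    rw [hg j]
    have : n - 1 + 1 = n := by omega
    rw [this]
    by_cases hj : j < n
    · rw [if_pos ⟨hj, by omega⟩, if_pos hj]
    · rw [if_neg (by omega), if_neg hj]

def pvZip (n : Nat) (p r : List Int) : List Int :=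
  (List.range n).foldl (fun r j => r.modify j (fun x => PySem.Int.bxor x (p.getD j 0))) r
theorem pvZip_length (n : Nat) (p r : List Int) : (pvZip n p r).length = r.length := by
  unfold pvZip
  induction n with
  | zero => simp
  | succ k ih =>
    rw [List.range_succ, List.foldl_append]
    simp only [List.foldl_cons, List.foldl_nil, List.length_modify]
    exact ih
theorem pvZip_getD (n : Nat) (p r : List Int) (j : Nat) :
    (pvZip n p r).getD j 0 =
      if j < n ∧ j < r.length then PySem.Int.bxor (r.getD j 0) (p.getD j 0) else r.getD j 0 := by
  induction n with
  | zero => simp [pvZip]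
  | succ k ih =>
    have hlen := pvZip_length k p r
    unfold pvZip at *
    rw [List.range_succ, List.foldl_append]
    simp only [List.foldl_cons, List.foldl_nil]
    rw [pv_getD_modify, hlen, ih]
    by_cases hj : j < r.length
    · by_cases hk : k = j
      · subst hk; simp [hj]
      · by_cases hjk : j < k <;> simp [hk, hj, hjk] <;> omega
    · simp [hj]

theorem pv_getElem?_modify_ne {α : Type} (l : List α) (i j : Nat) (f : α → α) (h : i ≠ j) :
    (l.modify i f)[j]? = l[j]? := by
  rw [List.getElem?_modify]
  cases l[j]? <;> simp [h]

theorem pvColStep_row (n : Nat) (g : List (List Int)) (i : Nat) (hi : 1 ≤ i) :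
    (List.range n).foldl
        (fun g j => g.modify i (fun row => row.modify j
          (fun x => PySem.Int.bxor x ((g.getD (i - 1) []).getD j 0)))) g =
      g.modify i (fun r => pvZip n (g.getD (i - 1) []) r) := by
  induction n with
  | zero =>
    simp only [List.range_zero, List.foldl_nil, pvZip]
    exact (List.modify_id i g).symm
  | succ k ih =>
    rw [List.range_succ, List.foldl_append, ih]
    simp only [List.foldl_cons, List.foldl_nil]
    have hne : i ≠ i - 1 := by omega
    have hread : ((g.modify i (fun r => pvZip k (g.getD (i - 1) []) r)).getD (i-1) []) = g.getD (i-1) [] := by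
      rw [pv_getD_modify]
      simp [fun h : i = i - 1 => hne h]
    rw [hread, List.modify_modify_eq]
    congr 1
    funext r
    simp only [Function.comp]
    simp only [pvZip, List.range_succ, List.foldl_append, List.foldl_cons, List.foldl_nil]




theorem pv_getElem?_eq_some_getD {α : Type} (l : List α) (y : Nat) (d : α) (hy : y < l.length) :
    l[y]? = some (l.getD y d) := by
  simp [List.getD_eq_getElem?_getD, List.getElem?_eq_getElem hy]

theorem pvAread_natCast (G : List (List Int)) (x y : Nat) (hx : x < G.length)
    (hy : y < (G.getD x []).length) :
    pvAread G (x : Int) (y : Int) = (G.getD x []).getD y 0 := by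
  unfold pvAread
  rw [PySem.List.pyGet?_natCast]
  rw [PySem.List.pyGet?_natCast]
  rw [pv_getElem?_eq_some_getD G x [] hx, Option.getD_some]
  rw [pv_getElem?_eq_some_getD _ y 0 hy, Option.getD_some]


theorem pv_bxor_left_comm (a b c : Int) :
    PySem.Int.bxor a (PySem.Int.bxor b c) = PySem.Int.bxor b (PySem.Int.bxor a c) := by
  rw [← pv_bxor_assoc, PySem.Int.bxor_comm a b, pv_bxor_assoc]
theorem pv_bxor_cancel (a b : Int) : PySem.Int.bxor a (PySem.Int.bxor a b) = b := by
  rw [← pv_bxor_assoc, PySem.Int.bxor_self, pv_zero_bxor]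

theorem pv_getD_modify_self {α : Type} (l : List α) (i : Nat) (f : α → α) (hi : i < l.length) (d : α) :
    (l.modify i f).getD i d = f (l.getD i d) := by
  rw [pv_getD_modify, if_pos ⟨rfl, hi⟩]

theorem pvAcell_aux (M n : Nat) (g : List (List Int)) (i : Nat)
    (hg : g.length = M) (hi : i < M)
    (ha : n ≤ (g.getD i []).length) (hp : 1 ≤ i → n ≤ (g.getD (i - 1) []).length) :
    ∀ k, k ≤ n →
      ((List.range k).foldl (fun g j => pvAcell (M:Int) (n:Int) i j g) g).length = g.length ∧
      (∀ i', i' ≠ i → ((List.range k).foldl (fun g j => pvAcell (M:Int) (n:Int) i j g) g)[i']? = g[i']?) ∧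
      ((((List.range k).foldl (fun g j => pvAcell (M:Int) (n:Int) i j g) g).getD i []).length = (g.getD i []).length) ∧
      (∀ j, (((List.range k).foldl (fun g j => pvAcell (M:Int) (n:Int) i j g) g).getD i []).getD j 0 =
        if j < k then PySem.Int.bxor (pvXpre (g.getD i []) j)
            (if 1 ≤ i then (g.getD (i-1) []).getD j 0 else 0)
        else (g.getD i []).getD j 0) := by
  intro k
  induction k with
  | zero => exact fun _ => ⟨rfl, fun _ _ => rfl, rfl, fun j => by simp⟩
  | succ k ih =>
    intro hk1
    obtain ⟨Q1, Q2, Q3, Q4⟩ := ih (by omega)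
    rw [List.range_succ, List.foldl_append]
    simp only [List.foldl_cons, List.foldl_nil]
    set G := (List.range k).foldl (fun g j => pvAcell (M:Int) (n:Int) i j g) g with hG
    have hk : k < n := by omega
    have hilen : i < G.length := by rw [Q1, hg]; exact hi
    have hileng : i < g.length := by rw [hg]; exact hi
    have hrowlen : (G.getD i []).length = (g.getD i []).length := Q3
    have hkrow : k < (G.getD i []).length := by omega
    simp only [pvAcell, List.foldl_cons, List.foldl_nil]
    have hGrowp : 1 ≤ i → G.getD (i-1) [] = g.getD (i-1) [] := by
      intro hi1
      rw [List.getD_eq_getElem?_getD, Q2 _ (by omega), ← List.getD_eq_getElem?_getD]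
    have hv1 : pvAread G ((i:Int) + -1) ((k:Int) + 0) *
        (if pvAvalid (M:Int) (n:Int) ((i:Int) + -1) ((k:Int) + 0) = true then 1 else 0) =
        (if 1 ≤ i then (g.getD (i-1) []).getD k 0 else 0) := by
      by_cases hi1 : 1 ≤ i
      · have hvalid : pvAvalid (M:Int) (n:Int) ((i:Int) + -1) ((k:Int) + 0) = true := by
          simp only [pvAvalid, decide_eq_true_eq]; omega
        rw [hvalid, if_pos rfl, mul_one, if_pos hi1]
        have eci : ((i:Int) + -1) = (((i-1:Nat)):Int) := by omega
        have ecj : ((k:Int) + 0) = ((k:Nat):Int) := by ring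
        rw [eci, ecj, pvAread_natCast G (i-1) k (by omega) (by rw [hGrowp hi1]; have := hp hi1; omega)]
        rw [hGrowp hi1]
      · have hvalid : pvAvalid (M:Int) (n:Int) ((i:Int) + -1) ((k:Int) + 0) = false := by
          simp only [pvAvalid, decide_eq_false_iff_not]
          omega
        rw [hvalid, if_neg (by simp), mul_zero, if_neg hi1]
    rw [hv1]
    set V1 : Int := if 1 ≤ i then (g.getD (i-1) []).getD k 0 else 0 with hV1
    set G1 : List (List Int) := G.modify i (fun row => row.modify k fun x => PySem.Int.bxor x V1) with hG1
    have hG1len : G1.length = G.length := by rw [hG1, List.length_modify]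
    have hG1row : G1.getD i [] = (G.getD i []).modify k (fun x => PySem.Int.bxor x V1) := by
      rw [hG1, pv_getD_modify_self _ _ _ hilen]
    have hG1ne : ∀ i', i' ≠ i → G1[i']? = G[i']? := by
      intro i' hne; rw [hG1, pv_getElem?_modify_ne _ _ _ _ (fun h => hne h.symm)]
    have hv2 : pvAread G1 ((i:Int) + 0) ((k:Int) + -1) *
        (if pvAvalid (M:Int) (n:Int) ((i:Int) + 0) ((k:Int) + -1) = true then 1 else 0) =
        (if 1 ≤ k then PySem.Int.bxor (pvXpre (g.getD i []) (k-1))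
            (if 1 ≤ i then (g.getD (i-1) []).getD (k-1) 0 else 0) else 0) := by
      by_cases hk1 : 1 ≤ k
      · have hvalid : pvAvalid (M:Int) (n:Int) ((i:Int) + 0) ((k:Int) + -1) = true := by
          simp only [pvAvalid, decide_eq_true_eq]; omega
        rw [hvalid, if_pos rfl, mul_one, if_pos hk1]
        have eci : ((i:Int) + 0) = ((i:Nat):Int) := by ring
        have ecj : ((k:Int) + -1) = (((k-1:Nat)):Int) := by omega
        rw [eci, ecj, pvAread_natCast G1 i (k-1) (by omega)
          (by rw [hG1row, List.length_modify]; omega)]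
        rw [hG1row, pv_getD_modify, if_neg (by omega), Q4 (k-1), if_pos (by omega)]
      · have hvalid : pvAvalid (M:Int) (n:Int) ((i:Int) + 0) ((k:Int) + -1) = false := by
          simp only [pvAvalid, decide_eq_false_iff_not]
          omega
        rw [hvalid, if_neg (by simp), mul_zero, if_neg hk1]
    rw [hv2]
    set V2 : Int := if 1 ≤ k then PySem.Int.bxor (pvXpre (g.getD i []) (k-1))
        (if 1 ≤ i then (g.getD (i-1) []).getD (k-1) 0 else 0) else 0 with hV2
    set G2 : List (List Int) := G1.modify i (fun row => row.modify k fun x => PySem.Int.bxor x V2) with hG2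
    have hG2len : G2.length = G.length := by rw [hG2, List.length_modify, hG1len]
    have hG2row : G2.getD i [] = ((G.getD i []).modify k (fun x => PySem.Int.bxor x V1)).modify k
        (fun x => PySem.Int.bxor x V2) := by
      rw [hG2, pv_getD_modify_self _ _ _ (by omega), hG1row]
    have hG2ne : ∀ i', i' ≠ i → G2[i']? = G[i']? := by
      intro i' hne
      rw [hG2, pv_getElem?_modify_ne _ _ _ _ (fun h => hne h.symm), hG1ne i' hne]
    have hv3 : pvAread G2 ((i:Int) + -1) ((k:Int) + -1) *
        (if pvAvalid (M:Int) (n:Int) ((i:Int) + -1) ((k:Int) + -1) = true then 1 else 0) =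
        (if 1 ≤ i ∧ 1 ≤ k then (g.getD (i-1) []).getD (k-1) 0 else 0) := by
      by_cases hik : 1 ≤ i ∧ 1 ≤ k
      · have hvalid : pvAvalid (M:Int) (n:Int) ((i:Int) + -1) ((k:Int) + -1) = true := by
          simp only [pvAvalid, decide_eq_true_eq]; omega
        rw [hvalid, if_pos rfl, mul_one, if_pos hik]
        have eci : ((i:Int) + -1) = (((i-1:Nat)):Int) := by omega
        have ecj : ((k:Int) + -1) = (((k-1:Nat)):Int) := by omega
        have hG2rowm : G2.getD (i-1) [] = g.getD (i-1) [] := by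
          rw [List.getD_eq_getElem?_getD, hG2ne _ (by omega), ← List.getD_eq_getElem?_getD,
            hGrowp hik.1]
        rw [eci, ecj, pvAread_natCast G2 (i-1) (k-1) (by omega)
          (by rw [hG2rowm]; have := hp hik.1; omega)]
        rw [hG2rowm]
      · have hvalid : pvAvalid (M:Int) (n:Int) ((i:Int) + -1) ((k:Int) + -1) = false := by
          simp only [pvAvalid, decide_eq_false_iff_not]
          omega
        rw [hvalid, if_neg (by simp), mul_zero, if_neg hik]
    rw [hv3]
    set V3 : Int := if 1 ≤ i ∧ 1 ≤ k then (g.getD (i-1) []).getD (k-1) 0 else 0 with hV3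
    set G3 : List (List Int) := G2.modify i (fun row => row.modify k fun x => PySem.Int.bxor x V3) with hG3
    have hG3len : G3.length = G.length := by rw [hG3, List.length_modify, hG2len]
    have hG3row : G3.getD i [] = (((G.getD i []).modify k (fun x => PySem.Int.bxor x V1)).modify k
        (fun x => PySem.Int.bxor x V2)).modify k (fun x => PySem.Int.bxor x V3) := by
      rw [hG3, pv_getD_modify_self _ _ _ (by omega), hG2row]
    have hG3ne : ∀ i', i' ≠ i → G3[i']? = G[i']? := by
      intro i' hne
      rw [hG3, pv_getElem?_modify_ne _ _ _ _ (fun h => hne h.symm), hG2ne i' hne]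
    refine ⟨by rw [hG3len, Q1], fun i' hne => by rw [hG3ne i' hne, Q2 i' hne], ?_, ?_⟩
    · rw [hG3row]; simp only [List.length_modify]; exact Q3
    · intro j
      rw [hG3row, pv_getD_modify, pv_getD_modify, pv_getD_modify]
      simp only [List.length_modify]
      by_cases hkj : k = j ∧ j < (G.getD i []).length
      · obtain ⟨hkj1, hkj2⟩ := hkj
        subst hkj1
        rw [if_pos ⟨rfl, hkj2⟩, if_pos ⟨rfl, hkj2⟩, if_pos ⟨rfl, hkj2⟩, if_pos (by omega)]
        rw [Q4 k, if_neg (by omega)]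
        have hxs : 1 ≤ k → pvXpre (g.getD i []) k = PySem.Int.bxor (pvXpre (g.getD i []) (k-1))
            ((g.getD i []).getD k 0) := by
          intro hk1
          have hs := pvXpre_succ (g.getD i []) (k-1) (by omega)
          rw [show k - 1 + 1 = k from by omega] at hs
          exact hs
        by_cases hi1 : 1 ≤ i <;> by_cases hk1 : 1 ≤ k <;>
          simp only [hV1, hV2, hV3, hi1, hk1, and_true, true_and, and_false, false_and,
            if_true, if_false, ite_true, ite_false, PySem.Int.bxor_zero]
        · rw [hxs hk1]
          simp only [pv_bxor_assoc, pv_bxor_left_comm, PySem.Int.bxor_comm, pv_bxor_cancel,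
            PySem.Int.bxor_self, PySem.Int.bxor_zero, pv_zero_bxor]
        · simp only [show k = 0 from by omega, pvXpre_zero (g.getD i []) (by omega)]
        · rw [hxs hk1]
          simp only [pv_bxor_assoc, pv_bxor_left_comm, PySem.Int.bxor_comm, pv_bxor_cancel,
            PySem.Int.bxor_self, PySem.Int.bxor_zero, pv_zero_bxor]
        · simp only [show k = 0 from by omega, pvXpre_zero (g.getD i []) (by omega)]
      · have hnokj : ¬ (k = j ∧ j < (G.getD i []).length) := hkj
        rw [if_neg hnokj, if_neg hnokj, if_neg hnokj, Q4 j]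
        by_cases hjk : j < k
        · rw [if_pos hjk, if_pos (show j < k + 1 from by omega)]
        · by_cases hjk1 : j < k + 1
          · have hj : j = k := by omega
            subst hj
            exact (hnokj ⟨rfl, hkrow⟩).elim
          · rw [if_neg hjk, if_neg hjk1]

theorem pv_ext_getD {α : Type} (d : α) (l₁ l₂ : List α) (hl : l₁.length = l₂.length)
    (h : ∀ j, l₁.getD j d = l₂.getD j d) : l₁ = l₂ := by
  apply List.ext_getElem?
  intro j
  by_cases hj : j < l₁.length
  · rw [pv_getElem?_eq_some_getD l₁ j d hj, pv_getElem?_eq_some_getD l₂ j d (by omega), h j]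
  · rw [List.getElem?_eq_none (by omega), List.getElem?_eq_none (by omega)]

theorem pv_modify_append {α : Type} (P : List α) (x : α) (rest : List α) (f : α → α) :
    (P ++ x :: rest).modify P.length f = P ++ f x :: rest := by
  induction P with
  | nil => simp [List.modify]
  | cons y ys ih => simpa [List.modify] using ih

theorem pv_modify_append' {α : Type} (P : List α) (x : α) (rest : List α) (f : α → α)
    (i : Nat) (h : i = P.length) :
    (P ++ x :: rest).modify i f = P ++ f x :: rest := by
  subst h; exact pv_modify_append P x rest f

def pvFinalRow (n : Nat) (g : List (List Int)) : Nat → List Int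
  | 0 => pvRowPass n (g.getD 0 [])
  | t + 1 => pvZip n (pvFinalRow n g t) (pvRowPass n (g.getD (t + 1) []))

theorem pvFinalRow_length (n : Nat) (g : List (List Int)) (t : Nat) :
    (pvFinalRow n g t).length = (g.getD t []).length := by
  cases t with
  | zero => exact pvRowPass_length n _
  | succ s => rw [pvFinalRow, pvZip_length, pvRowPass_length]

-- A's inner loop over one row collapses to rowPass (+ pointwise xor with the previous row)
theorem pvAcell_row (M n : Nat) (g : List (List Int)) (i : Nat)
    (hg : g.length = M) (hi : i < M)
    (ha : n ≤ (g.getD i []).length) (hp : 1 ≤ i → n ≤ (g.getD (i - 1) []).length) :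
    (List.range n).foldl (fun g j => pvAcell (M : Int) (n : Int) i j g) g =
      g.modify i (fun a =>
        if 1 ≤ i then pvZip n (g.getD (i - 1) []) (pvRowPass n a) else pvRowPass n a) := by
  obtain ⟨Q1, Q2, Q3, Q4⟩ := pvAcell_aux M n g i hg hi ha hp n (le_refl n)
  apply List.ext_getElem?
  intro i'
  by_cases hii : i' = i
  · subst hii
    have hlen : i' < g.length := by omega
    have hlenL : i' < ((List.range n).foldl (fun g j => pvAcell (M:Int) (n:Int) i' j g) g).length := by
      rw [Q1]; exact hlen
    rw [pv_getElem?_eq_some_getD _ i' [] hlenL]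
    rw [List.getElem?_modify, pv_getElem?_eq_some_getD g i' [] hlen]
    simp only [Option.map_some, Option.map, eq_self_iff_true, if_true, ite_true]
    congr 1
    beta_reduce
    apply pv_ext_getD 0
    · rw [Q3]
      by_cases hi1 : 1 ≤ i'
      · rw [if_pos hi1, pvZip_length, pvRowPass_length]
      · rw [if_neg hi1, pvRowPass_length]
    · intro j
      rw [Q4 j]
      by_cases hi1 : 1 ≤ i'
      · simp only [hi1, if_true]
        rw [pvZip_getD, pvRowPass_length, pvRowPass_getD n _ ha]
        by_cases hj : j < n
        · rw [if_pos hj, if_pos ⟨hj, by omega⟩, if_pos hj]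
        · rw [if_neg hj, if_neg (fun h => hj h.1), if_neg hj]
      · simp only [hi1, if_false]
        rw [pvRowPass_getD n _ ha]
        by_cases hj : j < n
        · rw [if_pos hj, if_pos hj, PySem.Int.bxor_zero]
        · rw [if_neg hj, if_neg hj]
  · rw [Q2 i' hii, pv_getElem?_modify_ne _ _ _ _ (fun h => hii h.symm)]

-- A's whole double loop produces the reference rows
theorem pvA_aux (xors : List (List Int)) (n : Nat)
    (hrows : ∀ row ∈ xors, n ≤ row.length) :
    ∀ t, t ≤ xors.length →
      (List.range t).foldl
          (fun g i => (List.range n).foldl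
            (fun g j => pvAcell (xors.length : Int) (n : Int) i j g) g) xors =
        (List.range t).map (pvFinalRow n xors) ++ xors.drop t := by
  intro t
  induction t with
  | zero => simp
  | succ t ih =>
    intro ht
    rw [List.range_succ, List.foldl_append]
    simp only [List.foldl_cons, List.foldl_nil]
    rw [ih (by omega)]
    set P := (List.range t).map (pvFinalRow n xors) with hP
    have hPlen : P.length = t := by rw [hP, List.length_map, List.length_range]
    have hdrop : xors.drop t = xors.getD t [] :: xors.drop (t + 1) := by
      rw [List.drop_eq_getElem_cons (by omega), List.getD_eq_getElem?_getD,
        List.getElem?_eq_getElem (by omega), Option.getD_some]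
    rw [hdrop]
    have hglen : (P ++ xors.getD t [] :: xors.drop (t + 1)).length = xors.length := by
      rw [List.length_append, hPlen, List.length_cons, List.length_drop]; omega
    have hgetT : (P ++ xors.getD t [] :: xors.drop (t + 1)).getD t [] = xors.getD t [] := by
      rw [List.getD_eq_getElem?_getD, List.getElem?_append, if_neg (by omega), hPlen,
        Nat.sub_self]
      simp
    have hgetPrev : 1 ≤ t →
        (P ++ xors.getD t [] :: xors.drop (t + 1)).getD (t - 1) [] = pvFinalRow n xors (t - 1) := by
      intro h1
      rw [List.getD_eq_getElem?_getD, List.getElem?_append, if_pos (by omega), hP,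
        List.getElem?_map, List.getElem?_range (by omega)]
      simp
    have hmem : xors.getD t [] ∈ xors := by
      rw [List.getD_eq_getElem?_getD, List.getElem?_eq_getElem (by omega), Option.getD_some]
      exact List.getElem_mem _
    rw [pvAcell_row xors.length n _ t hglen (by omega)
      (by rw [hgetT]; exact hrows _ hmem)
      (by intro h1; rw [hgetPrev h1, pvFinalRow_length]
          have hm : xors.getD (t-1) [] ∈ xors := by
            rw [List.getD_eq_getElem?_getD, List.getElem?_eq_getElem (by omega), Option.getD_some]
            exact List.getElem_mem _
          exact hrows _ hm)]
    rw [pv_modify_append' _ _ _ _ t hPlen.symm]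
    rw [List.map_append, List.map_cons, List.map_nil, List.append_assoc, ← hP]
    simp only [List.cons_append, List.nil_append]
    congr 2
    cases t with
    | zero => simp [pvFinalRow]
    | succ s =>
      rw [if_pos (by omega), pvFinalRow]
      rw [hgetPrev (by omega)]
      simp

-- B's two passes produce the reference rows
theorem pvB_aux (xors : List (List Int)) (n : Nat) (hne : xors ≠ []) :
    ∀ t, t ≤ xors.length - 1 →
      (List.range' 1 t).foldl
          (fun g i =>
            (List.range n).foldl
              (fun g j => g.modify i (fun row => row.modify j
                (fun x => PySem.Int.bxor x ((g.getD (i - 1) []).getD j 0)))) g)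
          (xors.map (pvRowPass n)) =
        (List.range (t + 1)).map (pvFinalRow n xors) ++ (xors.map (pvRowPass n)).drop (t + 1) := by
  intro t
  induction t with
  | zero =>
    intro _
    cases xors with
    | nil => exact absurd rfl hne
    | cons x rest =>
      simp [pvFinalRow]
  | succ t ih =>
    intro ht
    rw [List.range'_concat]
    simp only [Nat.one_mul, List.foldl_append, List.foldl_cons, List.foldl_nil]
    rw [ih (by omega)]
    set R := xors.map (pvRowPass n) with hR
    have hRlen : R.length = xors.length := by rw [hR, List.length_map]
    set P := (List.range (t + 1)).map (pvFinalRow n xors) with hP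
    have hPlen : P.length = t + 1 := by rw [hP, List.length_map, List.length_range]
    have hgetPrev : (P ++ R.drop (t + 1)).getD t [] = pvFinalRow n xors t := by
      rw [List.getD_eq_getElem?_getD, List.getElem?_append, if_pos (by omega), hP,
        List.getElem?_map, List.getElem?_range (by omega)]
      simp
    rw [pvColStep_row n _ (1 + t) (by omega)]
    have e1 : 1 + t - 1 = t := by omega
    rw [e1, hgetPrev]
    have hdrop : R.drop (t + 1) = pvRowPass n (xors.getD (t + 1) []) :: R.drop (t + 2) := by
      have hlt : t + 1 < R.length := by rw [hRlen]; omega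
      rw [List.drop_eq_getElem_cons hlt]
      congr 1
      have h1 : R[t + 1]? = some (pvRowPass n (xors.getD (t + 1) [])) := by
        rw [hR, List.getElem?_map, pv_getElem?_eq_some_getD xors (t + 1) [] (by omega)]
        rfl
      have h2 : R[t + 1]? = some R[t + 1] := List.getElem?_eq_getElem hlt
      rw [h1] at h2
      exact (Option.some_inj.mp h2).symm
    rw [hdrop]
    rw [show (1 + t) = P.length from by omega]
    rw [pv_modify_append]
    rw [List.range_succ, List.map_append, List.map_cons, List.map_nil, List.append_assoc]
    congr 2

-- ===== VERDICT (by name: the statement is the Claim_ definition above) =====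
theorem construct_xors_spec : Claim_equal_construct_xors := by
  intro xors _ hpre
  obtain ⟨hne, hrows⟩ := hpre
  unfold Spec_construct_xors construct_xors construct_xors_alt
  simp only []
  have hm1 : 1 ≤ xors.length := by cases xors with | nil => exact absurd rfl hne | cons _ _ => simp
  have hhead : (PySem.List.pyGet? xors 0).getD [] = xors.headD [] := by
    cases xors with
    | nil => exact absurd rfl hne
    | cons x rest => rw [show ((0:Int)) = ((0:Nat):Int) from rfl, PySem.List.pyGet?_natCast]; simp
  rw [hhead]
  set n := (xors.headD []).length with hn
  have hrows' : ∀ row ∈ xors, n ≤ row.length := hrows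
  rw [pvA_aux xors n hrows' xors.length (le_refl _)]
  have hB := pvB_aux xors n hne (xors.length - 1) (le_refl _)
  rw [show xors.length - 1 + 1 = xors.length from by omega] at hB
  unfold pvColPass
  rw [hB]
  rw [List.drop_of_length_le (l := xors.map (pvRowPass n)) (by rw [List.length_map]), List.drop_length]
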